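-- pv_equiv track=rewrite | github.com/RMcCurdy/Candy-Crush-Mario-Themed | fall.py | cells_fall
-- ===== SOURCE A (Python) =====
-- def cells_fall(a):
--     rowOfTileThatFell = None
--     columnOfTileThatFell = None
--     for i in range(8):
--         for j in range(7):
--
--             if a[i][j] != 13 and a[i + 1][j] == 13:
--                 falling = True
--                 x = 0
--                 while falling is True:
--                     if i + x + 1 < 9:
--                         if a[i + x][j] != 13 and a[i + x + 1][j] == 13:
--                             a[i + x + 1][j] = a[i + x][j]
--                             a[i + x][j] = 13
--                             rowOfTileThatFell = i + 1 + x
--                             columnOfTileThatFell = j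
--                             x += 1
--                         else:
--                             falling = False
--                     else:
--                         falling = False
--                 return a, rowOfTileThatFell, columnOfTileThatFell
--
--     return a, rowOfTileThatFell, columnOfTileThatFell
-- ===== SOURCE B (Python) =====
-- def cells_fall(a):
--     hit = next(((i, j) for i in range(8) for j in range(7)
--                 if a[i][j] != 13 and a[i + 1][j] == 13), None)
--     if hit is None:
--         return a, None, None
--     i, j = hit
--     k = i
--     while k + 1 < 9 and a[k + 1][j] == 13:
--         k += 1
--     a[k][j] = a[i][j]
--     a[i][j] = 13
--     return a, k, j
-- ===== Notes on version B (the rewrite author's own statement) =====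
-- stated objective: simpler
-- what changed: B finds the first fallable tile with a single lazy generator expression and computes its landing row directly, performing one move, instead of A's early-return nested loops driving a stepwise swap-and-rewrite while-loop.
import Mathlib
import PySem

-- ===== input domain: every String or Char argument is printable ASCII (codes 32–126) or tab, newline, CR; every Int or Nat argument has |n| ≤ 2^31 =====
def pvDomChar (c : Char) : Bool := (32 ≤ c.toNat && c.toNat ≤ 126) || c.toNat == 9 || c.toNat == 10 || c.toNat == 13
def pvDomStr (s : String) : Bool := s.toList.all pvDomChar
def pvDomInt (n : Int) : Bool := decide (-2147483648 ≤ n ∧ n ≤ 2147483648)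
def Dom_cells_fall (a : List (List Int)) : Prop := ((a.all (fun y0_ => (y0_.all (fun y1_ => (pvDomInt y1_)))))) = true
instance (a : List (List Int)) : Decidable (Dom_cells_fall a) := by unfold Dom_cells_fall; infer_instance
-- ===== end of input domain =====

-- B finds the first fallable tile with a lazy generator expression and moves it straight to its
-- landing row in one move, instead of A's stepwise swap-and-rewrite while-loop (simpler).
-- Both Pythons mutate `a` in place identically on Pre_; the theorems are about the return value.


-- ===== PORT A =====
-- a[i][j] read / write; under Pre_ every access either is in range or is short-circuited away,
-- so the getD defaults are never the value Python would have raised on (0 ≠ 13 keeps branches equal)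
def pyg2 (g : List (List Int)) (i j : Nat) : Int := (g.getD i []).getD j 0
def pys2 (g : List (List Int)) (i j : Nat) (v : Int) : List (List Int) :=
  g.set i ((g.getD i []).set j v)
-- the shared guard expression `a[r][j] != 13 and a[r+1][j] == 13`
def fallCond (g : List (List Int)) (r j : Nat) : Bool :=
  (pyg2 g r j != 13) && (pyg2 g (r+1) j == 13)

-- the `while falling is True` loop; fuel ≥ 9 is never exhausted (x stops once i+x+1 ≥ 9)
def whileA : Nat → List (List Int) → Nat → Nat → Nat → Option Int → Option Int →
    List (List Int) × Option Int × Option Int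
  | 0, g, _, _, _, r, c => (g, r, c)
  | fuel+1, g, i, j, x, r, c =>
    if i + x + 1 < 9 then
      if fallCond g (i+x) j then
        whileA fuel (pys2 (pys2 g (i+x+1) j (pyg2 g (i+x) j)) (i+x) j 13) i j (x+1)
          (some ((i : Int) + 1 + (x : Int))) (some (j : Int))
      else (g, r, c)
    else (g, r, c)

-- `for j in range(7)` with early return
def loopJA (g : List (List Int)) (i : Nat) :
    List Nat → Option (List (List Int) × Option Int × Option Int)
  | [] => none
  | j :: js => if fallCond g i j then some (whileA 9 g i j 0 none none) else loopJA g i js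

-- `for i in range(8)` with early return
def loopIA (g : List (List Int)) :
    List Nat → Option (List (List Int) × Option Int × Option Int)
  | [] => none
  | i :: is =>
    match loopJA g i (List.range 7) with
    | some r => some r
    | none => loopIA g is

def cells_fall (a : List (List Int)) : List (List Int) × Option Int × Option Int :=
  (loopIA a (List.range 8)).getD (a, none, none)

-- ===== PORT B =====
-- `next(((i, j) for i in range(8) for j in range(7) if …), None)`: first match of the lazy scan
-- `while k + 1 < 9 and a[k+1][j] == 13: k += 1` (fuel ≥ 9 is never exhausted)
def landB : Nat → List (List Int) → Nat → Nat → Nat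
  | 0, _, _, k => k
  | fuel+1, g, j, k => if k + 1 < 9 && (pyg2 g (k+1) j == 13) then landB fuel g j (k+1) else k

def cells_fall_alt (a : List (List Int)) : List (List Int) × Option Int × Option Int :=
  match (List.range 8).findSome? (fun i =>
      (List.range 7).findSome? (fun j => if fallCond a i j then some (i, j) else none)) with
  | none => (a, none, none)
  | some (i, j) =>
    let k := landB 9 a j i
    (pys2 (pys2 a k j (pyg2 a i j)) i j 13, some (k : Int), some (j : Int))

-- ===== PRECONDITION & SPEC =====
def rowLen (a : List (List Int)) (i : Nat) : Nat := (a.getD i []).length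

-- scanning position (i, j) neither raises nor finds a fallable tile
-- (`a[i][j] != 13 and a[i+1][j] == 13` short-circuits: the second cell is only read when the first is not 13)
def scanOk (a : List (List Int)) (i j : Nat) : Prop :=
  i < a.length ∧ j < rowLen a i ∧
    (pyg2 a i j = 13 ∨ (i + 1 < a.length ∧ j < rowLen a (i+1) ∧ pyg2 a (i+1) j ≠ 13))

-- the fall chain below (i, j) stays inside the board: 13-cells down to row k, then row 8 or a blocking cell
def chainOk (a : List (List Int)) (i j : Nat) : Prop :=
  ∃ k ∈ List.range 9, i + 1 ≤ k ∧
    (∀ r ∈ List.range 9, i + 1 ≤ r → r ≤ k → r < a.length ∧ j < rowLen a r ∧ pyg2 a r j = 13) ∧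
    (k = 8 ∨ (k + 1 < a.length ∧ j < rowLen a (k+1) ∧ pyg2 a (k+1) j ≠ 13))

-- Pre_ is exactly the boards on which Python A returns instead of raising IndexError: either the
-- full 8×7 scan runs through finding nothing (which needs all 9×7 reads in range), or the scan
-- reaches a first fallable tile without raising and that tile's fall chain stays inside the board.
def Pre_cells_fall (a : List (List Int)) : Prop :=
  (∀ i ∈ List.range 8, ∀ j ∈ List.range 7, scanOk a i j)
  ∨ ∃ i ∈ List.range 8, ∃ j ∈ List.range 7,
      (i + 1 < a.length ∧ j < rowLen a i ∧ j < rowLen a (i+1) ∧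
        pyg2 a i j ≠ 13 ∧ pyg2 a (i+1) j = 13) ∧
      (∀ p ∈ List.range 8, ∀ q ∈ List.range 7, (p < i ∨ (p = i ∧ q < j)) → scanOk a p q) ∧
      chainOk a i j
instance (a : List (List Int)) : Decidable (Pre_cells_fall a) := by
  unfold Pre_cells_fall scanOk chainOk; infer_instance

def pvWitness_cells_fall : List (List Int) := [[1], [13], [5]]

def Spec_cells_fall (a : List (List Int)) (out : List (List Int) × Option Int × Option Int) : Prop := out = cells_fall_alt a
instance (a : List (List Int)) (out : List (List Int) × Option Int × Option Int) : Decidable (Spec_cells_fall a out) := by unfold Spec_cells_fall; infer_instance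

-- ===== CLAIM (what is proved, stated in full; the proofs are below) =====
def Claim_equal_cells_fall : Prop := ∀ (a : List (List Int)), Dom_cells_fall a → Pre_cells_fall a → Spec_cells_fall a (cells_fall a)

-- ===== LEMMAS AND PROOFS =====
-- (the two ports are in fact equal on EVERY input — the Pre_ hypothesis only delimits where
--  Python A itself returns; the proofs below never need it)

lemma length_pys2 (g : List (List Int)) (r j : Nat) (v : Int) :
    (pys2 g r j v).length = g.length := by
  simp [pys2]

lemma pys2_def' (g : List (List Int)) (r j : Nat) (v : Int) :
    pys2 g r j v = g.set r ((g.getD r []).set j v) := rfl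

lemma row_pys2_ne (g : List (List Int)) {r r' : Nat} (j : Nat) (v : Int) (h : r ≠ r') :
    (pys2 g r j v).getD r' [] = g.getD r' [] := by
  simp [pys2, List.getD, List.getElem?_set_ne h]

lemma row_pys2_self (g : List (List Int)) (r j : Nat) (v : Int) (hr : r < g.length) :
    (pys2 g r j v).getD r [] = (g.getD r []).set j v := by
  simp [pys2, List.getD, hr]

lemma rowlen_pys2 (g : List (List Int)) (r r' j : Nat) (v : Int) :
    ((pys2 g r j v).getD r' []).length = (g.getD r' []).length := by
  by_cases h : r = r'
  · subst h
    by_cases hr : r < g.length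
    · rw [row_pys2_self g r j v hr]; simp
    · unfold pys2; rw [List.set_eq_of_length_le (by omega)]
  · rw [row_pys2_ne g j v h]

lemma pyg2_pys2_same (g : List (List Int)) (r j : Nat) (v : Int)
    (hr : r < g.length) (hj : j < (g.getD r []).length) :
    pyg2 (pys2 g r j v) r j = v := by
  unfold pyg2
  rw [row_pys2_self g r j v hr]
  simp [List.getD, List.getElem?_set_self (by simpa using hj)]

lemma pyg2_pys2_ne (g : List (List Int)) {r r' : Nat} (j j' : Nat) (v : Int) (h : r ≠ r') :
    pyg2 (pys2 g r j v) r' j' = pyg2 g r' j' := by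
  unfold pyg2
  rw [row_pys2_ne g j v h]

lemma pys2_comm (g : List (List Int)) {r1 r2 : Nat} (j1 j2 : Nat) (v1 v2 : Int)
    (h : r1 ≠ r2) :
    pys2 (pys2 g r1 j1 v1) r2 j2 v2 = pys2 (pys2 g r2 j2 v2) r1 j1 v1 := by
  rw [pys2_def' (pys2 g r1 j1 v1) r2 j2 v2, row_pys2_ne g j1 v1 h,
    pys2_def' (pys2 g r2 j2 v2) r1 j1 v1, row_pys2_ne g j2 v2 (Ne.symm h)]
  unfold pys2
  exact List.set_comm _ _ h

lemma pys2_collapse (g : List (List Int)) (r j : Nat) (v1 v2 : Int) (hr : r < g.length) :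
    pys2 (pys2 g r j v1) r j v2 = pys2 g r j v2 := by
  rw [pys2_def' (pys2 g r j v1) r j v2, row_pys2_self g r j v1 hr, List.set_set,
    pys2_def' g r j v1, List.set_set]
  rfl

lemma set_getD_self {α : Type} (l : List α) (n : Nat) (d : α) (h : n < l.length) :
    l.set n (l.getD n d) = l := by
  rw [List.getD_eq_getElem?_getD, List.getElem?_eq_getElem h, Option.getD_some,
    List.set_getElem_self]

lemma pys2_self (g : List (List Int)) (r j : Nat) (hr : r < g.length)
    (hj : j < (g.getD r []).length) (hv : pyg2 g r j = 13) :
    pys2 g r j 13 = g := by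
  rw [← hv]
  unfold pys2 pyg2
  rw [set_getD_self _ _ _ hj, set_getD_self _ _ _ hr]

-- a defaulted read can only return 13 from a real cell (the default is 0)
lemma pyg2_13_in_range (g : List (List Int)) (r j : Nat) (h : pyg2 g r j = 13) :
    r < g.length ∧ j < (g.getD r []).length := by
  by_cases hr : r < g.length
  · refine ⟨hr, ?_⟩
    by_cases hj : j < (g.getD r []).length
    · exact hj
    · rw [pyg2, List.getD_eq_getElem?_getD,
        List.getElem?_eq_none (by omega)] at h
      simp at h
  · rw [pyg2, List.getD_eq_getElem?_getD, List.getD_eq_getElem?_getD, List.getElem?_eq_none (show g.length ≤ r by omega)] at h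
    simp at h

lemma landB_ge (g : List (List Int)) (j : Nat) :
    ∀ fuel k, k ≤ landB fuel g j k := by
  intro fuel
  induction fuel with
  | zero => intro k; simp [landB]
  | succ n ih =>
    intro k
    simp only [landB]
    split
    · exact le_trans (by omega) (ih (k+1))
    · exact le_rfl

-- A's while-loop, from a state after x ≥ 1 swaps, equals B's direct landing computation
lemma whileA_eq_landB (g : List (List Int)) (i j : Nat) (t : Int) (ht : t ≠ 13) :
    ∀ fuel x, 1 ≤ x → i + x ≤ 8 → pyg2 g (i + x) j = 13 →
      whileA fuel (pys2 (pys2 g i j 13) (i + x) j t) i j x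
          (some ((i : Int) + (x : Int))) (some (j : Int))
        = (pys2 (pys2 g i j 13) (landB fuel g j (i + x)) j t,
           some ((landB fuel g j (i + x) : Nat) : Int), some (j : Int)) := by
  intro fuel
  induction fuel with
  | zero => intro x _ _ _; simp [whileA, landB]
  | succ n ih =>
    intro x hx hix h13
    obtain ⟨hrg, hjg⟩ := pyg2_13_in_range g (i + x) j h13
    have hlen1 : (pys2 g i j 13).length = g.length := length_pys2 ..
    have hrix : i + x < (pys2 g i j 13).length := by omega
    have hjx : j < ((pys2 g i j 13).getD (i + x) []).length := by
      rw [row_pys2_ne g j 13 (show i ≠ i + x by omega)]; exact hjg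
    have hne_ix : i ≠ i + x := by omega
    have hgx_same : pyg2 (pys2 (pys2 g i j 13) (i + x) j t) (i + x) j = t :=
      pyg2_pys2_same _ _ _ _ hrix hjx
    have hgx_below : pyg2 (pys2 (pys2 g i j 13) (i + x) j t) (i + x + 1) j
        = pyg2 g (i + x + 1) j := by
      rw [pyg2_pys2_ne _ _ _ _ (by omega), pyg2_pys2_ne _ _ _ _ (by omega)]
    simp only [whileA, landB]
    by_cases hb : i + x + 1 < 9
    · rw [if_pos hb]
      have hcond : fallCond (pys2 (pys2 g i j 13) (i + x) j t) (i + x) j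
          = (pyg2 g (i + x + 1) j == 13) := by
        simp [fallCond, hgx_same, hgx_below, ht]
      by_cases h13' : pyg2 g (i + x + 1) j = 13
      · rw [hcond]
        rw [if_pos (by simp [h13']), if_pos (by simp [hb, h13'])]
        -- rewrite the swapped grid into canonical single-move form
        have hgrid : pys2 (pys2 (pys2 (pys2 g i j 13) (i + x) j t) (i + x + 1) j
              (pyg2 (pys2 (pys2 g i j 13) (i + x) j t) (i + x) j)) (i + x) j 13
            = pys2 (pys2 g i j 13) (i + (x + 1)) j t := by
          rw [hgx_same, pys2_comm _ _ _ _ _ (show i + x ≠ i + x + 1 by omega),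
            pys2_collapse _ _ _ _ _ (by rw [length_pys2, hlen1]; omega)]
          have hB : pyg2 (pys2 (pys2 g i j 13) (i + x + 1) j t) (i + x) j = 13 := by
            rw [pyg2_pys2_ne _ _ _ _ (by omega), pyg2_pys2_ne _ _ _ _ hne_ix]; exact h13
          rw [pys2_self _ _ _ (by rw [length_pys2, hlen1]; omega)
            (by rw [rowlen_pys2, rowlen_pys2]; exact hjg) hB]
          rw [show i + (x + 1) = i + x + 1 by omega]
        rw [hgrid]
        have hr : (some ((i : Int) + 1 + (x : Int)) : Option Int)
            = some ((i : Int) + ((x + 1 : Nat) : Int)) := by push_cast; ring_nf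
        rw [hr, show i + x + 1 = i + (x + 1) by omega]
        exact ih (x + 1) (by omega) (by omega)
          (by rw [show i + (x + 1) = i + x + 1 by omega]; exact h13')
      · rw [hcond, if_neg (by simp [h13']), if_neg (by simp [h13'])]
        simp
    · rw [if_neg hb, if_neg (by simp [hb])]
      simp

lemma loopJA_eq (g : List (List Int)) (i : Nat) :
    ∀ js : List Nat, loopJA g i js
      = ((js.findSome? fun j => if fallCond g i j then some (i, j) else none).map
          (fun p => whileA 9 g p.1 p.2 0 none none)) := by
  intro js
  induction js with
  | nil => simp [loopJA]
  | cons j js ih =>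
    by_cases h : fallCond g i j
    · simp [loopJA, h]
    · simp [loopJA, h, ih]

lemma loopIA_eq (g : List (List Int)) :
    ∀ is : List Nat, loopIA g is
      = ((is.findSome? fun i =>
            (List.range 7).findSome? fun j =>
              if fallCond g i j then some (i, j) else none).map
          (fun p => whileA 9 g p.1 p.2 0 none none)) := by
  intro is
  induction is with
  | nil => simp [loopIA]
  | cons i is ih =>
    rw [List.findSome?_cons]
    cases h : ((List.range 7).findSome? fun j =>
        if fallCond g i j then some (i, j) else none) with
    | none => simp [loopIA, loopJA_eq, ih, h]
    | some p => simp [loopIA, loopJA_eq, h]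

-- ===== VERDICT (by name: the statement is the Claim_ definition above) =====
theorem cells_fall_spec : Claim_equal_cells_fall := by
  intro a _hdom _hpre
  unfold Spec_cells_fall cells_fall cells_fall_alt
  rw [loopIA_eq]
  cases h : ((List.range 8).findSome? fun i =>
      (List.range 7).findSome? fun j => if fallCond a i j then some (i, j) else none) with
  | none => simp
  | some p =>
    obtain ⟨i, j⟩ := p
    obtain ⟨i', hi', hinner⟩ := List.exists_of_findSome?_eq_some h
    obtain ⟨j', hj', hij⟩ := List.exists_of_findSome?_eq_some hinner
    rw [List.mem_range] at hi' hj'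
    have hcond : fallCond a i j = true ∧ i < 8 ∧ j < 7 := by
      by_cases hc : fallCond a i' j' = true
      · rw [if_pos hc] at hij
        simp only [Option.some.injEq, Prod.mk.injEq] at hij
        obtain ⟨rfl, rfl⟩ := hij
        exact ⟨hc, hi', hj'⟩
      · rw [if_neg hc] at hij
        exact absurd hij (by simp)
    obtain ⟨hc, hi8, hj7⟩ := hcond
    simp only [fallCond, Bool.and_eq_true, bne_iff_ne, ne_eq, beq_iff_eq] at hc
    obtain ⟨ht, h2⟩ := hc
    simp only [Option.map_some, Option.getD_some]
    rw [show (9 : Nat) = 8 + 1 from rfl, whileA, landB]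
    rw [if_pos (show i + 0 + 1 < 9 by omega)]
    rw [if_pos (show fallCond a (i + 0) j = true by simpa [fallCond] using ⟨ht, h2⟩)]
    rw [if_pos (show (decide (i + 1 < 9) && (pyg2 a (i + 1) j == 13)) = true by
      simp [h2]; omega)]
    have hgrid0 : pys2 (pys2 a (i + 0 + 1) j (pyg2 a (i + 0) j)) (i + 0) j 13
        = pys2 (pys2 a i j 13) (i + 1) j (pyg2 a i j) := by
      rw [show i + 0 = i from rfl, show i + 0 + 1 = i + 1 from rfl]
      exact pys2_comm a j j (pyg2 a i j) 13 (by omega)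
    rw [hgrid0]
    have hr0 : (some ((i : Int) + 1 + ((0 : Nat) : Int)) : Option Int)
        = some ((i : Int) + ((1 : Nat) : Int)) := by push_cast; ring_nf
    rw [show (0 : Nat) + 1 = 1 from rfl, hr0]
    have hmain := whileA_eq_landB a i j (pyg2 a i j) ht 8 1
      (by omega) (by omega) (by simpa using h2)
    rw [hmain]
    have hKge : i + 1 ≤ landB 8 a j (i + 1) := landB_ge a j 8 (i + 1)
    rw [pys2_comm a j j (pyg2 a i j) 13 (show landB 8 a j (i + 1) ≠ i by omega)]
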